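-- pv_equiv track=rewrite | github.com/bssrdf/pyleet | C/CampusBike.py | assignBikesTLE
-- ===== SOURCE A (Python) =====
-- import heapq
--
-- def assignBikesTLE(workers, bikes):
--     # write your code here
--     n, m = len(workers), len(bikes)
--     pq, res = [], [-1]*n
--     assigned, taken = set(), set()
--     for i in range(n):
--         for j in range(m):
--             md = abs(workers[i][0]-bikes[j][0]) + abs(workers[i][1]-bikes[j][1])
--             heapq.heappush(pq, (md, i, j))
--     while pq:
--         _, w, b = heapq.heappop(pq)
--         if w not in assigned:
--             assigned.add(w)
--             if b not in taken:
--                 taken.add(b)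
--                 res[w] = b
--             else:
--                 assigned.remove(w)
--     return res
-- ===== SOURCE B (Python) =====
-- def assignBikesTLE(workers, bikes):
--     # bucket the (worker, bike) pairs by Manhattan distance, then walk the
--     # distinct distances in ascending order; within a bucket the pairs are
--     # already in (worker, bike) order because of the generation order.
--     buckets = {}
--     for i in range(len(workers)):
--         for j in range(len(bikes)):
--             d = abs(workers[i][0]-bikes[j][0]) + abs(workers[i][1]-bikes[j][1])
--             buckets.setdefault(d, []).append((i, j))
--     res = [-1] * len(workers)
--     taken = [False] * len(bikes)
--     for d in sorted(buckets):
--         for i, j in buckets[d]: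
--             if res[i] == -1 and not taken[j]:
--                 res[i] = j
--                 taken[j] = True
--     return res
-- ===== Notes on version B (the rewrite author's own statement) =====
-- stated objective: faster
-- what changed: A pushes all n*m (distance, worker, bike) triples onto a heap and pops them one by one with set-based bookkeeping; B groups the pairs into a dict bucketed by distance (insertion order already sorts ties by worker then bike), sorts only the distinct distances, and scans the buckets updating res/taken arrays directly.
import Mathlib
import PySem

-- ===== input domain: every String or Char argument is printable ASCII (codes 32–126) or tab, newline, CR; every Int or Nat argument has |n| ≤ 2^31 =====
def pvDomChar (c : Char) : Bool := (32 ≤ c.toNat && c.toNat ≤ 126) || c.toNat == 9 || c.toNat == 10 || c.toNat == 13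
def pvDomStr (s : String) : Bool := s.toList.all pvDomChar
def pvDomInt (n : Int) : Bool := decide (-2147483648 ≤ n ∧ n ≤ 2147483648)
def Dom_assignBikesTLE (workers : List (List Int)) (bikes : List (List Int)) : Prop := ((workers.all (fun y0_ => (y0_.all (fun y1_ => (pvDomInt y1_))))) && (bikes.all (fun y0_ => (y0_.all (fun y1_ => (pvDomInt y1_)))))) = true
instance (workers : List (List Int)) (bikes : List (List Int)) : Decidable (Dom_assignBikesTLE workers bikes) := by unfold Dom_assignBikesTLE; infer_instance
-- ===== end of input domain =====

-- B replaces A's heap of all worker×bike pairs by a dict bucketing the pairs by distance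
-- (only the distinct distances get sorted); same return value, measurably smaller constants.

-- ===== PORT A =====
-- shared distance expression 'abs(workers[i][0]-bikes[j][0]) + abs(workers[i][1]-bikes[j][1])';
-- row indexing via pyGetD — exact under Pre_ (rows have length ≥ 2 whenever a row is indexed),
-- and the defaults are never read there.
def pvDist (w b : List Int) : Int :=
  |PySem.List.pyGetD w 0 0 - PySem.List.pyGetD b 0 0| + |PySem.List.pyGetD w 1 0 - PySem.List.pyGetD b 1 0|

-- Python '<' on the pushed triples (lexicographic; components are ints)
def pvLt3 (a b : Int × Int × Int) : Bool :=
  decide (a.1 < b.1) || (a.1 == b.1 && (decide (a.2.1 < b.2.1) || (a.2.1 == b.2.1 && decide (a.2.2 < b.2.2))))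

-- heapq model: all pushes happen before any pop and the pushed triples are pairwise distinct,
-- so the heap is exactly a bag from which heappop removes the least triple (first minimal element).
def pvPopMin : List (Int × Int × Int) → Option ((Int × Int × Int) × List (Int × Int × Int))
  | [] => none
  | x :: xs =>
    match pvPopMin xs with
    | none => some (x, [])
    | some (m, r) => if pvLt3 m x then some (m, x :: r) else some (x, xs)

theorem pvPopMin_length : ∀ {l : List (Int × Int × Int)} {m r},
    pvPopMin l = some (m, r) → r.length < l.length := by
  intro l
  induction l using pvPopMin.induct with
  | case1 => intro m r h; simp [pvPopMin] at h
  | case2 x xs hx ih =>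
    intro m r h
    simp only [pvPopMin, hx] at h
    simp at h; obtain ⟨-, h2⟩ := h; subst h2; simp
  | case3 x xs m0 r0 hx hlt ih =>
    intro m r h
    simp only [pvPopMin, hx, hlt, if_pos] at h
    simp at h; obtain ⟨-, h2⟩ := h; subst h2
    have := ih (m := m0) (r := r0) hx
    simp; omega
  | case4 x xs m0 r0 hx hlt ih =>
    intro m r h
    simp only [pvPopMin, hx, hlt] at h
    simp at h; obtain ⟨-, h2⟩ := h; subst h2; simp

-- the 'while pq' loop of A, verbatim: pop least; if w unassigned, add w; if the bike is taken
-- put w back ('.remove' on an element just added = discard), else take the bike and write res[w]=b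
-- (w is a worker index, 0 ≤ w < len(res), so 'res[w] = b' is 'List.set w.toNat b' exactly).
def pvLoopA (pq : List (Int × Int × Int)) (assigned taken : PySem.Set Int) (res : List Int) : List Int :=
  match h : pvPopMin pq with
  | none => res
  | some ((_, w, b), rest) =>
    if PySem.Set.contains assigned w then pvLoopA rest assigned taken res
    else
      if PySem.Set.contains taken b then
        pvLoopA rest (PySem.Set.discard (PySem.Set.add assigned w) w) taken res
      else
        pvLoopA rest (PySem.Set.add assigned w) (PySem.Set.add taken b) (res.set w.toNat b)
termination_by pq.length
decreasing_by all_goals exact pvPopMin_length h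

def assignBikesTLE (workers : List (List Int)) (bikes : List (List Int)) : List Int :=
  let n : Int := workers.length
  let m : Int := bikes.length
  let pq : List (Int × Int × Int) :=
    (PySem.List.pyRange 0 n).foldl (fun pq i =>
      (PySem.List.pyRange 0 m).foldl (fun pq j =>
        pq ++ [(pvDist (PySem.List.pyGetD workers i []) (PySem.List.pyGetD bikes j []), i, j)]) pq) []
  let res : List Int := PySem.List.pyRepeat [(-1 : Int)] n
  pvLoopA pq PySem.Set.empty PySem.Set.empty res

-- ===== PORT B =====
-- 'if res[i] == -1 and not taken[j]: res[i] = j; taken[j] = True' — i, j are in-range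
-- nonnegative indices, so pyGetD/List.set are the exact list accesses.
def pvStepB (st : List Int × List Bool) (p : Int × Int) : List Int × List Bool :=
  if PySem.List.pyGetD st.1 p.1 0 == -1 && !(PySem.List.pyGetD st.2 p.2 false) then
    (st.1.set p.1.toNat p.2, st.2.set p.2.toNat true)
  else st

def assignBikesTLE_alt (workers : List (List Int)) (bikes : List (List Int)) : List Int :=
  -- buckets.setdefault(d, []).append((i, j))  ==  buckets[d] = buckets.get(d, []) + [(i, j)]
  let buckets : PySem.Dict Int (List (Int × Int)) :=
    (PySem.List.pyRange 0 (workers.length : Int)).foldl (fun d i =>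
      (PySem.List.pyRange 0 (bikes.length : Int)).foldl (fun d j =>
        d.modify (pvDist (PySem.List.pyGetD workers i []) (PySem.List.pyGetD bikes j [])) []
          (fun v => v ++ [(i, j)])) d)
      PySem.Dict.empty
  let res : List Int := PySem.List.pyRepeat [(-1 : Int)] (workers.length : Int)
  let taken : List Bool := PySem.List.pyRepeat [false] (bikes.length : Int)
  -- 'for d in sorted(buckets)': the dict's keys, sorted ascending
  let st :=
    (PySem.List.sorted buckets.keys (fun x => x) false).foldl
      (fun st d => (buckets.getD d []).foldl pvStepB st) (res, taken)
  st.1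

-- ===== PRECONDITION & SPEC =====
-- Pre_ excludes exactly the inputs on which Python A raises IndexError: a row of length < 2
-- is actually indexed (which happens iff both outer lists are nonempty).
def Pre_assignBikesTLE (workers : List (List Int)) (bikes : List (List Int)) : Prop :=
  workers = [] ∨ bikes = [] ∨ ((∀ w ∈ workers, 2 ≤ w.length) ∧ (∀ b ∈ bikes, 2 ≤ b.length))
instance (workers : List (List Int)) (bikes : List (List Int)) : Decidable (Pre_assignBikesTLE workers bikes) := by
  unfold Pre_assignBikesTLE; infer_instance
def pvWitness_assignBikesTLE : List (List Int) × List (List Int) :=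
  ([[0, 0], [2, 1]], [[1, 2], [3, 3]])

def Spec_assignBikesTLE (workers : List (List Int)) (bikes : List (List Int)) (out : List Int) : Prop := out = assignBikesTLE_alt workers bikes
instance (workers : List (List Int)) (bikes : List (List Int)) (out : List Int) : Decidable (Spec_assignBikesTLE workers bikes out) := by unfold Spec_assignBikesTLE; infer_instance

-- ===== CLAIM (what is proved, stated in full; the proofs are below) =====
def Claim_equal_assignBikesTLE : Prop := ∀ (workers : List (List Int)) (bikes : List (List Int)), Dom_assignBikesTLE workers bikes → Pre_assignBikesTLE workers bikes → Spec_assignBikesTLE workers bikes (assignBikesTLE workers bikes)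

-- ===== LEMMAS AND PROOFS =====

-- lexicographic ≤ on triples, as a Prop
def pvLe3 (a b : Int × Int × Int) : Prop :=
  a.1 < b.1 ∨ (a.1 = b.1 ∧ (a.2.1 < b.2.1 ∨ (a.2.1 = b.2.1 ∧ a.2.2 ≤ b.2.2)))

-- strict lexicographic < on the (i, j) part only
def pvSndLt (a b : Int × Int × Int) : Prop :=
  a.2.1 < b.2.1 ∨ (a.2.1 = b.2.1 ∧ a.2.2 < b.2.2)

theorem pvLt3_iff (a b : Int × Int × Int) :
    pvLt3 a b = true ↔ (a.1 < b.1 ∨ (a.1 = b.1 ∧ (a.2.1 < b.2.1 ∨ (a.2.1 = b.2.1 ∧ a.2.2 < b.2.2)))) := by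
  simp [pvLt3]
theorem pvLt3_false_iff (a b : Int × Int × Int) : pvLt3 a b = false ↔ pvLe3 b a := by
  rw [← Bool.not_eq_true, pvLt3_iff]; unfold pvLe3
  constructor <;> intro h <;> omega
theorem pvLe3_refl (a : Int × Int × Int) : pvLe3 a a := by unfold pvLe3; omega
theorem pvLe3_antisymm {a b : Int × Int × Int} (h1 : pvLe3 a b) (h2 : pvLe3 b a) : a = b := by
  unfold pvLe3 at *
  obtain ⟨a1, a2, a3⟩ := a; obtain ⟨b1, b2, b3⟩ := b
  simp_all only [Prod.mk.injEq]
  omega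

theorem pvLe3_trans {a b c : Int × Int × Int} (h1 : pvLe3 a b) (h2 : pvLe3 b c) : pvLe3 a c := by
  unfold pvLe3 at *; omega

theorem pvPopMin_eq_none_iff (l : List (Int × Int × Int)) : pvPopMin l = none ↔ l = [] := by
  cases l with
  | nil => simp [pvPopMin]
  | cons x xs =>
    cases hx : pvPopMin xs with
    | none => simp [pvPopMin, hx]
    | some p => obtain ⟨m, r⟩ := p; simp only [pvPopMin, hx]; split <;> simp

theorem pvPopMin_perm : ∀ {l : List (Int × Int × Int)} {m r},
    pvPopMin l = some (m, r) → (m :: r).Perm l := by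
  intro l
  induction l using pvPopMin.induct with
  | case1 => intro m r h; simp [pvPopMin] at h
  | case2 x xs hx ih =>
    intro m r h
    simp only [pvPopMin, hx] at h; simp at h; obtain ⟨h1, h2⟩ := h; subst h1; subst h2
    rw [(pvPopMin_eq_none_iff xs).mp hx]
  | case3 x xs m0 r0 hx hlt ih =>
    intro m r h
    simp only [pvPopMin, hx, hlt, if_pos] at h; simp at h
    obtain ⟨h1, h2⟩ := h; subst h1; subst h2
    refine List.Perm.trans ?_ ((ih hx).cons x)
    exact List.Perm.swap x m0 r0
  | case4 x xs m0 r0 hx hlt ih =>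
    intro m r h
    simp only [pvPopMin, hx, hlt] at h; simp at h
    obtain ⟨h1, h2⟩ := h; subst h1; subst h2
    exact List.Perm.refl _

theorem pvPopMin_min : ∀ {l : List (Int × Int × Int)} {m r},
    pvPopMin l = some (m, r) → ∀ y ∈ l, pvLe3 m y := by
  intro l
  induction l using pvPopMin.induct with
  | case1 => intro m r h; simp [pvPopMin] at h
  | case2 x xs hx ih =>
    intro m r h y hy
    simp only [pvPopMin, hx] at h; simp at h; obtain ⟨h1, -⟩ := h; subst h1
    rw [(pvPopMin_eq_none_iff xs).mp hx] at hy
    simp at hy; subst hy; exact pvLe3_refl _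
  | case3 x xs m0 r0 hx hlt ih =>
    intro m r h y hy
    simp only [pvPopMin, hx, hlt, if_pos] at h; simp at h
    obtain ⟨h1, -⟩ := h; subst h1
    rcases List.mem_cons.mp hy with hy | hy
    · rw [hy]
      have := (pvLt3_iff m0 x).mp hlt
      unfold pvLe3; omega
    · exact ih hx y hy
  | case4 x xs m0 r0 hx hlt ih =>
    intro m r h y hy
    simp only [pvPopMin, hx, hlt] at h; simp at h
    obtain ⟨h1, -⟩ := h; subst h1
    have hxm0 : pvLe3 x m0 := (pvLt3_false_iff m0 x).mp (by simpa using hlt)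
    rcases List.mem_cons.mp hy with hy | hy
    · rw [hy]; exact pvLe3_refl _
    · exact pvLe3_trans hxm0 (ih hx y hy)

-- selection sort induced by pvPopMin: the exact pop order of the loop in A
def pvSelSort (l : List (Int × Int × Int)) : List (Int × Int × Int) :=
  match h : pvPopMin l with
  | none => []
  | some (m, r) => m :: pvSelSort r
termination_by l.length
decreasing_by exact pvPopMin_length h

theorem pvSelSort_perm (l : List (Int × Int × Int)) : (pvSelSort l).Perm l := by
  induction l using pvSelSort.induct with
  | case1 l h => rw [pvSelSort, h, (pvPopMin_eq_none_iff l).mp h]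
  | case2 l m r h ih =>
    rw [pvSelSort, h]
    exact (ih.cons m).trans (pvPopMin_perm h)

theorem pvSelSort_sorted (l : List (Int × Int × Int)) : (pvSelSort l).Pairwise pvLe3 := by
  induction l using pvSelSort.induct with
  | case1 l h => rw [pvSelSort, h]; exact List.Pairwise.nil
  | case2 l m r h ih =>
    rw [pvSelSort, h]
    refine List.Pairwise.cons ?_ ih
    intro y hy
    have hyr : y ∈ r := ((pvSelSort_perm r).mem_iff).mp hy
    have : y ∈ (m :: r) := List.mem_cons_of_mem m hyr
    exact pvPopMin_min h y (((pvPopMin_perm h).mem_iff).mp this)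

-- the full pair list both programs generate, in generation order
def pvPairs (workers bikes : List (List Int)) : List (Int × Int × Int) :=
  (PySem.List.pyRange 0 (workers.length : Int)).flatMap (fun i =>
    (PySem.List.pyRange 0 (bikes.length : Int)).map (fun j =>
      (pvDist (PySem.List.pyGetD workers i []) (PySem.List.pyGetD bikes j []), i, j)))

-- A's loop as a fold step over the popped triples
def pvStepA (st : PySem.Set Int × PySem.Set Int × List Int) (p : Int × Int × Int) :
    PySem.Set Int × PySem.Set Int × List Int :=
  if PySem.Set.contains st.1 p.2.1 then st
  else
    if PySem.Set.contains st.2.1 p.2.2 then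
      (PySem.Set.discard (PySem.Set.add st.1 p.2.1) p.2.1, st.2.1, st.2.2)
    else
      (PySem.Set.add st.1 p.2.1, PySem.Set.add st.2.1 p.2.2, st.2.2.set p.2.1.toNat p.2.2)

theorem pvLoopA_eq_foldl : ∀ (pq : List (Int × Int × Int)) (a t : PySem.Set Int) (res : List Int),
    pvLoopA pq a t res = ((pvSelSort pq).foldl pvStepA (a, t, res)).2.2 := by
  intro pq
  induction pq using pvSelSort.induct with
  | case1 l h =>
    intro a t res
    rw [pvLoopA, pvSelSort, h]
    simp
  | case2 l m r h ih =>
    intro a t res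
    obtain ⟨d, w, b⟩ := m
    rw [pvLoopA, pvSelSort, h]
    simp only [List.foldl_cons]
    by_cases h1 : PySem.Set.contains a w
    · simp only [h1, if_pos, pvStepA, ih]
    · by_cases h2 : PySem.Set.contains t b
      · simp only [h1, h2, if_pos, if_neg, Bool.false_eq_true, not_false_iff, ih, pvStepA]
      · simp only [h1, h2, if_neg, Bool.false_eq_true, not_false_iff, ih, pvStepA]

-- ===== generation of the pair list =====

theorem pvBuildA_eq (workers bikes : List (List Int)) :
    ((PySem.List.pyRange 0 (workers.length : Int)).foldl (fun pq i =>
      (PySem.List.pyRange 0 (bikes.length : Int)).foldl (fun pq j =>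
        pq ++ [(pvDist (PySem.List.pyGetD workers i []) (PySem.List.pyGetD bikes j []), i, j)]) pq) [])
    = pvPairs workers bikes := by
  unfold pvPairs
  refine Eq.trans (PySem.List.foldl_congr_mem _ _ _ _
    (fun acc i _ => PySem.List.foldl_append_singleton_eq_map _ _ acc)) ?_
  exact Eq.trans (PySem.List.foldl_append_eq_flatMap _ _ _) (List.nil_append _)

theorem pvBuildB_eq (workers bikes : List (List Int)) :
    ((PySem.List.pyRange 0 (workers.length : Int)).foldl (fun d i =>
      (PySem.List.pyRange 0 (bikes.length : Int)).foldl (fun d j =>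
        d.modify (pvDist (PySem.List.pyGetD workers i []) (PySem.List.pyGetD bikes j [])) []
          (fun v => v ++ [(i, j)])) d)
      PySem.Dict.empty)
    = (pvPairs workers bikes).foldl (fun d p => d.modify p.1 [] (fun v => v ++ [p.2]))
        PySem.Dict.empty := by
  unfold pvPairs
  rw [List.foldl_flatMap]
  exact (PySem.List.foldl_congr_mem _ _ _ _ (fun acc i _ => by rw [List.foldl_map])).symm

def pvBuckets (workers bikes : List (List Int)) : PySem.Dict Int (List (Int × Int)) :=
  (pvPairs workers bikes).foldl (fun d p => d.modify p.1 [] (fun v => v ++ [p.2])) PySem.Dict.empty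

theorem pvBuckets_getD (workers bikes : List (List Int)) (c : Int) :
    (pvBuckets workers bikes).getD c []
      = ((pvPairs workers bikes).filter (fun p => p.1 == c)).map (fun p => p.2) := by
  unfold pvBuckets
  rw [PySem.Dict.getD_foldl_modify_append]
  simp

theorem pvBuckets_keys (workers bikes : List (List Int)) :
    (pvBuckets workers bikes).keys
      = PySem.Set.ofList ((pvPairs workers bikes).map (fun p => p.1)) := by
  unfold pvBuckets
  rw [PySem.Dict.keys_foldl_modify_key ((pvPairs workers bikes)) (fun p => p.1) []
    (fun _ p => (fun v => v ++ [p.2]))]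
  rw [PySem.Dict.keys_empty, PySem.Set.update_nil_left]

-- the sorted distinct keys B iterates over
def pvKs (workers bikes : List (List Int)) : List Int :=
  PySem.List.sorted (PySem.Set.ofList ((pvPairs workers bikes).map (fun p => p.1))) (fun x => x) false

theorem pvKs_pairwise_lt (workers bikes : List (List Int)) :
    (pvKs workers bikes).Pairwise (· < ·) := by
  have hle := PySem.List.sorted_pairwise (PySem.Set.ofList ((pvPairs workers bikes).map (fun p => p.1))) (fun x => x)
  have hnd : (pvKs workers bikes).Nodup :=
    (PySem.List.sorted_perm _ _ _).nodup_iff.mpr (PySem.Set.nodup_ofList _)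
  exact (hle.and hnd).imp (fun h => lt_of_le_of_ne h.1 h.2)

theorem pvKs_cover (workers bikes : List (List Int)) :
    ∀ p ∈ pvPairs workers bikes, p.1 ∈ pvKs workers bikes := by
  intro p hp
  rw [pvKs, (PySem.List.sorted_perm _ _ _).mem_iff, PySem.Set.mem_ofList]
  exact List.mem_map_of_mem hp

theorem pvRange_pairwise (n : Nat) :
    (PySem.List.pyRange 0 (n : Int)).Pairwise (· < ·) := by
  rw [PySem.List.pyRange_zero_natCast]
  exact List.Pairwise.map _ (fun a b hab => by exact_mod_cast hab) List.pairwise_lt_range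

theorem pvPairs_pairwise (workers bikes : List (List Int)) :
    (pvPairs workers bikes).Pairwise pvSndLt := by
  unfold pvPairs
  rw [List.pairwise_flatMap]
  constructor
  · intro i _
    rw [List.pairwise_map]
    exact (pvRange_pairwise bikes.length).imp (fun h => Or.inr ⟨rfl, h⟩)
  · refine (pvRange_pairwise workers.length).imp ?_
    intro i1 i2 h x hx y hy
    obtain ⟨j1, -, rfl⟩ := List.mem_map.mp hx
    obtain ⟨j2, -, rfl⟩ := List.mem_map.mp hy
    exact Or.inl h

theorem pvPairs_bounds (workers bikes : List (List Int)) :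
    ∀ p ∈ pvPairs workers bikes,
      0 ≤ p.2.1 ∧ p.2.1 < (workers.length : Int) ∧ 0 ≤ p.2.2 ∧ p.2.2 < (bikes.length : Int) := by
  intro p hp
  unfold pvPairs at hp
  obtain ⟨i, hi, hp⟩ := List.mem_flatMap.mp hp
  obtain ⟨j, hj, rfl⟩ := List.mem_map.mp hp
  have hi' := PySem.List.mem_pyRange_one.mp hi
  have hj' := PySem.List.mem_pyRange_one.mp hj
  exact ⟨hi'.1, hi'.2, hj'.1, hj'.2⟩

-- grouping a list by its (distinct, covering) keys is a permutation of the list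
theorem pvPerm_flatMap_filter : ∀ (ds : List Int) (l : List (Int × Int × Int)), ds.Nodup →
    (∀ p ∈ l, p.1 ∈ ds) →
    (ds.flatMap (fun c => l.filter (fun p => p.1 == c))).Perm l := by
  intro ds
  induction ds with
  | nil =>
    intro l _ hcov
    have : l = [] := List.eq_nil_iff_forall_not_mem.mpr (fun p hp => by simpa using hcov p hp)
    subst this; simp
  | cons d ds ih =>
    intro l hnd hcov
    rw [List.flatMap_cons]
    have hstep : ∀ c ∈ ds, l.filter (fun p => p.1 == c)
        = (l.filter (fun p => !(p.1 == d))).filter (fun p => p.1 == c) := by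
      intro c hc
      rw [List.filter_filter]
      refine (List.filter_congr ?_)
      intro p _
      by_cases hpc : p.1 = c
      · have hpd : p.1 ≠ d := by
          intro hd
          have hdc : d = c := by rw [← hd, hpc]
          exact (List.nodup_cons.mp hnd).1 (hdc ▸ hc)
        simp only [hpc]
        simp
        exact fun hcd => hpd (hpc.trans hcd)
      · simp [hpc]
    have hmap : ds.flatMap (fun c => l.filter (fun p => p.1 == c))
        = ds.flatMap (fun c => (l.filter (fun p => !(p.1 == d))).filter (fun p => p.1 == c)) := by
      unfold List.flatMap
      rw [List.map_congr_left (fun c hc => by rw [hstep c hc])]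
    rw [hmap]
    have hcov' : ∀ p ∈ l.filter (fun p => !(p.1 == d)), p.1 ∈ ds := by
      intro p hp
      obtain ⟨hpl, hpd⟩ := List.mem_filter.mp hp
      rcases List.mem_cons.mp (hcov p hpl) with h | h
      · simp at hpd; exact absurd h hpd
      · exact h
    refine ((ih _ (List.nodup_cons.mp hnd).2 hcov').append_left
      (l.filter (fun p => p.1 == d))).trans ?_
    exact List.filter_append_perm (fun p => p.1 == d) l
    
theorem pvGrouped_eq_selSort (workers bikes : List (List Int)) :
    (pvKs workers bikes).flatMap (fun c => (pvPairs workers bikes).filter (fun p => p.1 == c))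
      = pvSelSort (pvPairs workers bikes) := by
  have hks := pvKs_pairwise_lt workers bikes
  refine List.Perm.eq_of_pairwise (fun a b _ _ hab hba => pvLe3_antisymm hab hba) ?_ ?_ ?_
  · rw [List.pairwise_flatMap]
    constructor
    · intro c _
      rw [List.pairwise_filter]
      refine (pvPairs_pairwise workers bikes).imp ?_
      intro a b hab hac hbc
      have hac' : a.1 = c := by simpa using hac
      have hbc' : b.1 = c := by simpa using hbc
      unfold pvSndLt at hab; unfold pvLe3
      omega
    · refine hks.imp ?_
      intro c1 c2 hlt x hx y hy
      have hx' : x.1 = c1 := by simpa using (List.mem_filter.mp hx).2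
      have hy' : y.1 = c2 := by simpa using (List.mem_filter.mp hy).2
      exact Or.inl (by omega)
  · exact pvSelSort_sorted _
  · refine (pvPerm_flatMap_filter _ _ (hks.imp ne_of_lt) (pvKs_cover workers bikes)).trans
      (pvSelSort_perm _).symm

-- ===== the two fold loops compute the same result =====

theorem pvSet_discard_add_self (a : PySem.Set Int) (w : Int) (h : PySem.Set.contains a w = false) :
    PySem.Set.discard (PySem.Set.add a w) w = a := by
  have hw : w ∉ a := fun hm => absurd ((PySem.Set.contains_iff a w).mpr hm) (by rw [h]; exact Bool.false_ne_true)
  rw [PySem.Set.add_of_not_mem hw]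
  show (a ++ [w]).filter (fun y => !(y == w)) = a
  rw [List.filter_append]
  have h1 : a.filter (fun y => !(y == w)) = a :=
    List.filter_eq_self.mpr (fun y hy => by simp; exact fun hyw => hw (hyw ▸ hy))
  simp [h1]

theorem pvGetD_set_self {α : Type} (xs : List α) (i : Int) (v d : α)
    (h0 : 0 ≤ i) (hl : i.toNat < xs.length) :
    PySem.List.pyGetD (xs.set i.toNat v) i d = v := by
  rw [PySem.List.pyGetD_of_nonneg _ _ h0, List.getD_eq_getElem?_getD, List.getElem?_set]
  simp [hl]

theorem pvGetD_set_ne {α : Type} (xs : List α) (i k : Int) (v d : α)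
    (h0 : 0 ≤ i) (hk : 0 ≤ k) (hne : k ≠ i) :
    PySem.List.pyGetD (xs.set i.toNat v) k d = PySem.List.pyGetD xs k d := by
  rw [PySem.List.pyGetD_of_nonneg _ _ hk, PySem.List.pyGetD_of_nonneg _ _ hk,
    List.getD_eq_getElem?_getD, List.getD_eq_getElem?_getD, List.getElem?_set]
  have : ¬ i.toNat = k.toNat := fun h => hne (by omega)
  simp [this]

theorem pvFoldAB : ∀ (l : List (Int × Int × Int)) (a t : PySem.Set Int) (res : List Int) (tk : List Bool),
    (∀ p ∈ l, 0 ≤ p.2.1 ∧ p.2.1.toNat < res.length ∧ 0 ≤ p.2.2 ∧ p.2.2.toNat < tk.length) →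
    (∀ p ∈ l, (PySem.Set.contains a p.2.1 = true ↔ ¬ PySem.List.pyGetD res p.2.1 0 = -1)
            ∧ (PySem.Set.contains t p.2.2 = true ↔ PySem.List.pyGetD tk p.2.2 false = true)) →
    (l.foldl pvStepA (a, t, res)).2.2 = ((l.map (fun p => p.2)).foldl pvStepB (res, tk)).1 := by
  intro l
  induction l with
  | nil => intro a t res tk _ _; simp
  | cons p l ih =>
    intro a t res tk hb hinv
    obtain ⟨d, i, j⟩ := p
    obtain ⟨hi0, hiN, hj0, hjM⟩ := hb _ List.mem_cons_self
    obtain ⟨hiffA, hiffT⟩ := hinv _ List.mem_cons_self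
    dsimp only at hi0 hiN hj0 hjM hiffA hiffT
    simp only [List.map_cons, List.foldl_cons]
    by_cases h1 : PySem.Set.contains a i
    · have hres : ¬ PySem.List.pyGetD res i 0 = -1 := hiffA.mp h1
      have hA : pvStepA (a, t, res) (d, i, j) = (a, t, res) := by
        simp only [pvStepA]; rw [if_pos h1]
      have hB : pvStepB (res, tk) (i, j) = (res, tk) := by
        have hcond : (PySem.List.pyGetD res i 0 == -1) = false := by simpa using hres
        simp [pvStepB, hcond]
      rw [hA, hB]
      exact ih a t res tk (fun q hq => hb q (List.mem_cons_of_mem _ hq))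
        (fun q hq => hinv q (List.mem_cons_of_mem _ hq))
    · have hres : PySem.List.pyGetD res i 0 = -1 := by
        by_contra hc; exact h1 (hiffA.mpr hc)
      by_cases h2 : PySem.Set.contains t j
      · have htk : PySem.List.pyGetD tk j false = true := hiffT.mp h2
        have h1f : PySem.Set.contains a i = false := by
          revert h1; cases PySem.Set.contains a i <;> simp
        have hA : pvStepA (a, t, res) (d, i, j) = (a, t, res) := by
          simp only [pvStepA]
          rw [if_neg h1, if_pos h2, pvSet_discard_add_self a i h1f]
        have hB : pvStepB (res, tk) (i, j) = (res, tk) := by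
          have hcond : (!(PySem.List.pyGetD tk j false)) = false := by simp [htk]
          simp [pvStepB, hcond]
        rw [hA, hB]
        exact ih a t res tk (fun q hq => hb q (List.mem_cons_of_mem _ hq))
          (fun q hq => hinv q (List.mem_cons_of_mem _ hq))
      · have htk : PySem.List.pyGetD tk j false = false := by
          cases hx : PySem.List.pyGetD tk j false
          · rfl
          · exact absurd (hiffT.mpr hx) h2
        have hA : pvStepA (a, t, res) (d, i, j)
            = (PySem.Set.add a i, PySem.Set.add t j, res.set i.toNat j) := by
          simp only [pvStepA]
          rw [if_neg h1, if_neg h2]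
        have hB : pvStepB (res, tk) (i, j) = (res.set i.toNat j, tk.set j.toNat true) := by
          simp only [pvStepB]
          rw [if_pos (by simp [hres, htk])]
        rw [hA, hB]
        refine ih _ _ _ _ ?_ ?_
        · intro q hq
          obtain ⟨q1, q2, q3, q4⟩ := hb q (List.mem_cons_of_mem _ hq)
          simpa using ⟨q1, q2, q3, q4⟩
        · intro q hq
          obtain ⟨qi0, qiN, qj0, qjM⟩ := hb q (List.mem_cons_of_mem _ hq)
          obtain ⟨qA, qT⟩ := hinv q (List.mem_cons_of_mem _ hq)
          constructor
          · by_cases hqi : q.2.1 = i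
            · rw [hqi, pvGetD_set_self res i j 0 hi0 hiN]
              simp only [PySem.Set.contains_iff, PySem.Set.mem_add]
              constructor
              · intro _; omega
              · intro _; exact Or.inr trivial
            · rw [pvGetD_set_ne res i q.2.1 j 0 hi0 qi0 hqi]
              simp only [PySem.Set.contains_iff, PySem.Set.mem_add]
              constructor
              · rintro (h | h)
                · exact qA.mp ((PySem.Set.contains_iff a q.2.1).mpr h)
                · exact absurd h hqi
              · intro h
                exact Or.inl ((PySem.Set.contains_iff a q.2.1).mp (qA.mpr h))
          · by_cases hqj : q.2.2 = j
            · rw [hqj, pvGetD_set_self tk j true false hj0 hjM]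
              simp only [PySem.Set.contains_iff, PySem.Set.mem_add]
              constructor
              · intro _; trivial
              · intro _; exact Or.inr trivial
            · rw [pvGetD_set_ne tk j q.2.2 true false hj0 qj0 hqj]
              simp only [PySem.Set.contains_iff, PySem.Set.mem_add]
              constructor
              · rintro (h | h)
                · exact qT.mp ((PySem.Set.contains_iff t q.2.2).mpr h)
                · exact absurd h hqj
              · intro h
                exact Or.inl ((PySem.Set.contains_iff t q.2.2).mp (qT.mpr h))

theorem pvGetD_replicate {α : Type} (n : Nat) (a d : α) (k : Int) (hk : 0 ≤ k) (hlt : k.toNat < n) :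
    PySem.List.pyGetD (List.replicate n a) k d = a := by
  rw [PySem.List.pyGetD_of_nonneg _ _ hk, List.getD_eq_getElem?_getD, List.getElem?_replicate]
  simp [hlt]

-- ===== VERDICT (by name: the statement is the Claim_ definition above) =====
theorem assignBikesTLE_spec : Claim_equal_assignBikesTLE := by
  unfold Claim_equal_assignBikesTLE
  intro workers bikes _ _
  show assignBikesTLE workers bikes = assignBikesTLE_alt workers bikes
  unfold assignBikesTLE assignBikesTLE_alt
  simp only [PySem.List.pyRepeat_singleton, Int.toNat_natCast]
  rw [pvBuildA_eq, pvLoopA_eq_foldl]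
  rw [show ((PySem.List.pyRange 0 (workers.length : Int)).foldl (fun d i =>
      (PySem.List.pyRange 0 (bikes.length : Int)).foldl (fun d j =>
        d.modify (pvDist (PySem.List.pyGetD workers i []) (PySem.List.pyGetD bikes j [])) []
          (fun v => v ++ [(i, j)])) d)
      PySem.Dict.empty) = pvBuckets workers bikes from pvBuildB_eq workers bikes]
  rw [pvBuckets_keys]
  rw [show PySem.List.sorted (PySem.Set.ofList ((pvPairs workers bikes).map (fun p => p.1)))
      (fun x => x) false = pvKs workers bikes from rfl]
  rw [PySem.List.foldl_congr_mem (pvKs workers bikes) _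
    (fun st c => (((pvPairs workers bikes).filter (fun p => p.1 == c)).map (fun p => p.2)).foldl pvStepB st)
    _ (fun st c _ => by rw [pvBuckets_getD])]
  rw [← List.foldl_flatMap, ← List.map_flatMap, pvGrouped_eq_selSort]
  refine pvFoldAB _ _ _ _ _ ?_ ?_
  · intro p hp
    have hbd := pvPairs_bounds workers bikes p ((pvSelSort_perm _).mem_iff.mp hp)
    simp only [List.length_replicate]
    omega
  · intro p hp
    have hbd := pvPairs_bounds workers bikes p ((pvSelSort_perm _).mem_iff.mp hp)
    constructor
    · rw [pvGetD_replicate workers.length (-1) 0 p.2.1 hbd.1 (by omega)]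
      simp [PySem.Set.empty]
    · rw [pvGetD_replicate bikes.length false false p.2.2 hbd.2.2.1 (by omega)]
      simp [PySem.Set.empty]
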